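-- pv_equiv track=rewrite | github.com/xanderxue/partialSHIC | convert_to_FVs_empirical.py | getSnpIndicesInSubWins
-- ===== SOURCE A (Python) =====
-- def getSnpIndicesInSubWins(subWinSize,positions):
--   subWinStart=1
--   subWinEnd=subWinStart+subWinSize-1
--   snpIndicesInSubWins=None
--   for i in range(len(positions)):
--     if snpIndicesInSubWins and not (positions[i]>=subWinStart and positions[i]<=subWinEnd):
--       snpIndicesInSubWins.append([])
--     while not (positions[i]>=subWinStart and positions[i]<=subWinEnd):
--       subWinStart+=subWinSize
--       subWinEnd+=subWinSize
--     if not snpIndicesInSubWins: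
--       snpIndicesInSubWins=[[]]
--     snpIndicesInSubWins[-1].append(i)
--   return snpIndicesInSubWins
-- ===== SOURCE B (Python) =====
-- def getSnpIndicesInSubWins(subWinSize, positions):
--     if not positions:
--         return None
--     groups = []
--     prev = None
--     for i, p in enumerate(positions):
--         w = (p - 1) // subWinSize
--         if prev != w:
--             groups.append([])
--             prev = w
--         groups[-1].append(i)
--     return groups
-- ===== Notes on version B (the rewrite author's own statement) =====
-- stated objective: alternative
-- what changed: B computes each position's subwindow index directly as (p-1)//subWinSize in one pass and starts a new group when the index changes, instead of A's while loop that slides the window forward step by step; B also returns normally on inputs where A's while loop would hang.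
import Mathlib
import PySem

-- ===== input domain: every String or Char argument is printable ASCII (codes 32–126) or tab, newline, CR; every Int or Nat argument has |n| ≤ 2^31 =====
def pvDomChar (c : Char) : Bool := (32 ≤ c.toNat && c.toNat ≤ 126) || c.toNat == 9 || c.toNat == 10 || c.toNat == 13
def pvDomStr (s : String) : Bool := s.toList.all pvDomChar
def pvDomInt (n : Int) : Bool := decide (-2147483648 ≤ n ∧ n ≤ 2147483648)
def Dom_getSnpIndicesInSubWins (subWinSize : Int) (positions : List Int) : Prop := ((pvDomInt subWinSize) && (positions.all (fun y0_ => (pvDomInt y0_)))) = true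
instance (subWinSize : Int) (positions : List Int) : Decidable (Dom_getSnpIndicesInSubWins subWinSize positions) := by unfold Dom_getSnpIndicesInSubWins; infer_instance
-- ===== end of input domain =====

-- B replaces A's step-by-step window-sliding while loop by the closed-form subwindow
-- index (p-1)//subWinSize in a single pass (a different algorithm of similar measured cost).

-- ===== PORT A =====

-- Python truthiness of the snpIndicesInSubWins variable (None → False, list → nonempty)
def pvTruthy : Option (List (List Int)) → Bool
  | none => false
  | some g => !g.isEmpty

-- g[-1].append(i): both Pythons append i to the last group in place
def pvAppendLast (g : List (List Int)) (i : Int) : List (List Int) :=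
  g.dropLast ++ [g.getLastD [] ++ [i]]

-- the 'while not (p>=subWinStart and p<=subWinEnd): subWinStart+=s; subWinEnd+=s' loop;
-- the fuel only bounds the (possibly diverging) Python loop and is always sufficient inside Pre_
def pvAdvLoop (s : Int) : Nat → Int → Int → Int → Int × Int
  | 0, ws, we, _ => (ws, we)
  | fuel + 1, ws, we, p =>
      if ws ≤ p ∧ p ≤ we then (ws, we)
      else pvAdvLoop s fuel (ws + s) (we + s) p

-- the body of 'for i in range(len(positions))', recursing over positions with index i
def pvLoopA (s : Int) : Int → Int → Option (List (List Int)) → Int → List Int →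
    Option (List (List Int))
  | _, _, acc, _, [] => acc
  | ws, we, acc, i, p :: rest =>
      let acc1 :=
        if pvTruthy acc ∧ ¬(ws ≤ p ∧ p ≤ we) then acc.map (fun g => g ++ [[]]) else acc
      let st := pvAdvLoop s ((p - we).toNat + 1) ws we p
      let acc2 := match acc1 with | none => some [[]] | some g => some g
      let acc3 := acc2.map (fun g => pvAppendLast g i)
      pvLoopA s st.1 st.2 acc3 (i + 1) rest

def getSnpIndicesInSubWins (subWinSize : Int) (positions : List Int) : Option (List (List Int)) :=
  pvLoopA subWinSize 1 (1 + subWinSize - 1) none 0 positions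

-- ===== PORT B =====

def pvLoopB (s : Int) : List (List Int) → Option Int → Int → List Int → List (List Int)
  | groups, _, _, [] => groups
  | groups, prev, i, p :: rest =>
      let w := PySem.Int.floordiv (p - 1) s
      let groups1 := if prev ≠ some w then groups ++ [[]] else groups
      pvLoopB s (pvAppendLast groups1 i) (some w) (i + 1) rest

def getSnpIndicesInSubWins_alt (subWinSize : Int) (positions : List Int) :
    Option (List (List Int)) :=
  match positions with
  | [] => none
  | _ => some (pvLoopB subWinSize [] none 0 positions)

-- ===== PRECONDITION & SPEC =====

-- the subwindow indices (p-1)//subWinSize are nondecreasing along the list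
def pvChain (s : Int) : List Int → Bool
  | [] => true
  | [_] => true
  | a :: b :: l =>
      decide (PySem.Int.floordiv (a - 1) s ≤ PySem.Int.floordiv (b - 1) s) &&
        pvChain s (b :: l)

-- Pre_ excludes exactly the inputs on which A's while loop never terminates (Python hangs):
-- a nonempty positions list with subWinSize < 1, a position < 1, or a position whose
-- subwindow index is smaller than an earlier position's.
def Pre_getSnpIndicesInSubWins (subWinSize : Int) (positions : List Int) : Prop :=
  positions = [] ∨
    (1 ≤ subWinSize ∧ (∀ p ∈ positions, 1 ≤ p) ∧ pvChain subWinSize positions = true)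

instance (subWinSize : Int) (positions : List Int) :
    Decidable (Pre_getSnpIndicesInSubWins subWinSize positions) := by
  unfold Pre_getSnpIndicesInSubWins; infer_instance

def pvWitness_getSnpIndicesInSubWins : Int × List Int := (5, [1, 3, 7, 12])

def Spec_getSnpIndicesInSubWins (subWinSize : Int) (positions : List Int)
    (out : Option (List (List Int))) : Prop := out = getSnpIndicesInSubWins_alt subWinSize positions
instance (subWinSize : Int) (positions : List Int) (out : Option (List (List Int))) :
    Decidable (Spec_getSnpIndicesInSubWins subWinSize positions out) := by
  unfold Spec_getSnpIndicesInSubWins; infer_instance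

-- ===== CLAIM (what is proved, stated in full; the proofs are below) =====
def Claim_equal_getSnpIndicesInSubWins : Prop := ∀ (subWinSize : Int) (positions : List Int), Dom_getSnpIndicesInSubWins subWinSize positions → Pre_getSnpIndicesInSubWins subWinSize positions → Spec_getSnpIndicesInSubWins subWinSize positions (getSnpIndicesInSubWins subWinSize positions)

-- ===== LEMMAS AND PROOFS =====

theorem pv_fd_window {s p w : Int} (hs : 1 ≤ s) :
    PySem.Int.floordiv (p - 1) s = w ↔ s * w + 1 ≤ p ∧ p ≤ s * w + s := by
  rw [PySem.Int.floordiv_eq_iff_of_pos (by omega)]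
  constructor <;> intro h <;> exact ⟨by nlinarith [h.1, h.2], by nlinarith [h.1, h.2]⟩

theorem pvChain_head {s a : Int} {l : List Int} (h : pvChain s (a :: l) = true) :
    ∀ q ∈ l.head?, PySem.Int.floordiv (a - 1) s ≤ PySem.Int.floordiv (q - 1) s := by
  intro q hq
  cases l with
  | nil => simp at hq
  | cons b l =>
      simp only [List.head?_cons, Option.mem_some_iff] at hq
      subst hq
      simp only [pvChain, Bool.and_eq_true, decide_eq_true_eq] at h
      exact h.1

theorem pvChain_tail {s a : Int} {l : List Int} (h : pvChain s (a :: l) = true) :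
    pvChain s l = true := by
  cases l with
  | nil => rfl
  | cons b l =>
      simp only [pvChain, Bool.and_eq_true] at h
      exact h.2

theorem pvAdvLoop_eq {s p : Int} (hs : 1 ≤ s) :
    ∀ (fuel : Nat) (j : Int), j ≤ PySem.Int.floordiv (p - 1) s →
      (p - (s * j + s)).toNat < fuel →
      pvAdvLoop s fuel (s * j + 1) (s * j + s) p =
        (s * PySem.Int.floordiv (p - 1) s + 1, s * PySem.Int.floordiv (p - 1) s + s) := by
  intro fuel
  induction fuel with
  | zero => intro j _ h; omega
  | succ f ih =>
      intro j hj hf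
      by_cases hw : PySem.Int.floordiv (p - 1) s = j
      · have hin := (pv_fd_window (p := p) (w := j) hs).mp hw
        simp [pvAdvLoop, hw, hin.1, hin.2]
      · have hlt : j + 1 ≤ PySem.Int.floordiv (p - 1) s := by omega
        have h3 : s * (j + 1) ≤ s * PySem.Int.floordiv (p - 1) s :=
          mul_le_mul_of_nonneg_left hlt (by omega)
        have h4 := ((pv_fd_window (p := p) (w := PySem.Int.floordiv (p - 1) s) hs).mp rfl).1
        have hp : s * (j + 1) + 1 ≤ p := by omega
        have hmul : s * (j + 1) = s * j + s := by ring
        rw [pvAdvLoop, if_neg (by omega)]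
        have := ih (j + 1) hlt (by omega)
        rw [hmul] at this
        convert this using 2 <;> omega

theorem pvAppendLast_ne_nil (g : List (List Int)) (i : Int) : pvAppendLast g i ≠ [] := by
  simp [pvAppendLast]

-- main invariant: once A's window has caught up with the subwindow index w of the last
-- processed position and the accumulated groups are equal, the two loops stay equal.
theorem pvLoop_eq {s : Int} (hs : 1 ≤ s) :
    ∀ (rest : List Int) (w : Int) (groups : List (List Int)) (i : Int),
      groups ≠ [] →
      (∀ q ∈ rest.head?, w ≤ PySem.Int.floordiv (q - 1) s) →
      pvChain s rest = true →
      pvLoopA s (s * w + 1) (s * w + s) (some groups) i rest =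
        some (pvLoopB s groups (some w) i rest) := by
  intro rest
  induction rest with
  | nil => intro w groups i _ _ _; rfl
  | cons p rest ih =>
      intro w groups i hg hhead hchain
      have hwle : w ≤ PySem.Int.floordiv (p - 1) s := hhead p (by simp)
      have hnext := pvChain_head hchain
      have htail := pvChain_tail hchain
      rw [pvLoopA, pvLoopB]
      by_cases heq : PySem.Int.floordiv (p - 1) s = w
      · -- same subwindow: neither side opens a new group
        have hin := (pv_fd_window (p := p) (w := w) hs).mp heq
        have hadv : pvAdvLoop s ((p - (s * w + s)).toNat + 1) (s * w + 1) (s * w + s) p =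
            (s * w + 1, s * w + s) := by
          simp [pvAdvLoop, hin.1, hin.2]
        simp only [hadv, heq, hin.1, hin.2, and_true, true_and, not_true_eq_false, and_false,
          if_false, ne_eq, not_true_eq_false, Option.map_some, ite_false]
        exact ih w (pvAppendLast groups i) (i + 1) (pvAppendLast_ne_nil groups i)
          (fun q hq => heq ▸ hnext q hq) htail
      · -- new subwindow: both append an empty group; A's window advances to index fd p
        set w' := PySem.Int.floordiv (p - 1) s with hw'
        have hout : ¬(s * w + 1 ≤ p ∧ p ≤ s * w + s) := fun h => heq ((pv_fd_window hs).mpr h)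
        have hadv := pvAdvLoop_eq hs ((p - (s * w + s)).toNat + 1) w hwle (by omega)
        simp only [pvTruthy, hg, ← hw', hadv]
        rw [if_pos ⟨by simpa using hg, hout⟩, if_pos (by simpa using (Ne.symm heq))]
        simp only [Option.map_some]
        exact ih w' (pvAppendLast (groups ++ [[]]) i) (i + 1) (pvAppendLast_ne_nil _ i)
          hnext htail

-- ===== VERDICT (by name: the statement is the Claim_ definition above) =====
theorem getSnpIndicesInSubWins_spec : Claim_equal_getSnpIndicesInSubWins := by
  intro s positions _ hpre
  unfold Spec_getSnpIndicesInSubWins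
  cases positions with
  | nil => rfl
  | cons p rest =>
      rcases hpre with h | ⟨hs, hpos, hchain⟩
      · exact absurd h (by simp)
      have hp1 : 1 ≤ p := hpos p (by simp)
      set w0 := PySem.Int.floordiv (p - 1) s with hw0
      have hb := (pv_fd_window (p := p) (w := w0) hs).mp rfl
      have hw0nn : 0 ≤ w0 := by nlinarith [hb.1, hb.2]
      have hA : getSnpIndicesInSubWins s (p :: rest) =
          pvLoopA s (s * w0 + 1) (s * w0 + s) (some [[0]]) 1 rest := by
        unfold getSnpIndicesInSubWins
        rw [pvLoopA]
        have e : 1 + s - 1 = s := by ring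
        rw [e]
        have hadv := pvAdvLoop_eq (p := p) hs ((p - s).toNat + 1) 0 hw0nn
          (by have h2 : s * 0 + s = s := by ring
              rw [h2]; omega)
        have e1 : s * 0 + 1 = (1 : Int) := by ring
        have e2 : s * 0 + s = s := by ring
        rw [e1, e2] at hadv
        simp [pvTruthy, hadv, pvAppendLast, ← hw0]
      have hB : getSnpIndicesInSubWins_alt s (p :: rest) =
          some (pvLoopB s [[0]] (some w0) 1 rest) := by
        unfold getSnpIndicesInSubWins_alt
        rw [pvLoopB]
        simp [← hw0, pvAppendLast]
      rw [hA, hB]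
      exact pvLoop_eq hs rest w0 [[0]] 1 (by simp) (pvChain_head hchain) (pvChain_tail hchain)
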